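-- pv_equiv track=rewrite | github.com/oblivion420/RomanConversion | Sinica-Taigi-System-master/lib/syl_trans.py | check_if_syl
-- ===== SOURCE A (Python) =====
-- def check_if_syl(in_str):
--     count_dict = {'.': 0, '/': 0, ':': 0}
--     for cha in in_str:
--         if cha in count_dict:
--             count_dict[cha] += 1
--
--     for key, value in count_dict.items():
--         if value > 1:
--             return False
--     else:
--         return True
-- ===== SOURCE B (Python) =====
-- def check_if_syl(in_str):
--     seen = set()
--     for cha in in_str:
--         if cha in ('.', '/', ':'):
--             if cha in seen:
--                 return False
--             seen.add(cha)
--     return True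
-- ===== Notes on version B (the rewrite author's own statement) =====
-- stated objective: simpler
-- what changed: Replaces the count dictionary plus a second threshold pass with a single early-exit scan maintaining a set of delimiters already seen.
import Mathlib
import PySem

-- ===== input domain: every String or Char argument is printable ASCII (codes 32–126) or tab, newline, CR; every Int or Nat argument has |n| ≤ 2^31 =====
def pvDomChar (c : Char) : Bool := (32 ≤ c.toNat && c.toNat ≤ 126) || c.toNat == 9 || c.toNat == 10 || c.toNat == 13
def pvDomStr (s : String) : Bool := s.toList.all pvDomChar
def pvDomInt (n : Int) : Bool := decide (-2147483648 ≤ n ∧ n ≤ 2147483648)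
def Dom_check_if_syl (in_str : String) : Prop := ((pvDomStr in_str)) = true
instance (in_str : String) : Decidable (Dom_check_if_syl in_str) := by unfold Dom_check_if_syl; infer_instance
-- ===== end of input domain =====

-- B replaces A's count-dictionary plus threshold pass with a single early-exit scan over a seen-set (objective: simpler).


-- ===== PORT A =====
-- second loop of A: walk the items, return False on a value > 1, else True
def checkItemsA : List (Char × Int) → Bool
  | [] => true
  | (_, value) :: rest => if value > 1 then false else checkItemsA rest

def check_if_syl (in_str : String) : Bool :=
  let count_dict : PySem.Dict Char Int := PySem.Dict.mk [('.', 0), ('/', 0), (':', 0)]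
  let count_dict := in_str.toList.foldl
    (fun d cha => if d.contains cha then d.modify cha 0 (· + 1) else d) count_dict
  checkItemsA count_dict.items

-- ===== PORT B =====
-- B's loop: early exit on a delimiter already seen
def scanB : List Char → PySem.Set Char → Bool
  | [], _ => true
  | cha :: rest, seen =>
    if cha = '.' ∨ cha = '/' ∨ cha = ':' then
      if PySem.Set.contains seen cha then false
      else scanB rest (PySem.Set.add seen cha)
    else scanB rest seen

def check_if_syl_alt (in_str : String) : Bool :=
  scanB in_str.toList PySem.Set.empty

-- ===== PRECONDITION & SPEC =====
def Spec_check_if_syl (in_str : String) (out : Bool) : Prop := out = check_if_syl_alt in_str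
instance (in_str : String) (out : Bool) : Decidable (Spec_check_if_syl in_str out) := by unfold Spec_check_if_syl; infer_instance

-- ===== CLAIM (what is proved, stated in full; the proofs are below) =====
def Claim_equal_check_if_syl : Prop := ∀ (in_str : String), Dom_check_if_syl in_str → Spec_check_if_syl in_str (check_if_syl in_str)

-- ===== LEMMAS AND PROOFS =====

-- A's counting fold on the literal three-key dict just increments the three counters
lemma foldA_counts (l : List Char) (a b c : Int) :
    l.foldl (fun d cha => if d.contains cha then d.modify cha 0 (· + 1) else d)
      (PySem.Dict.mk [('.', a), ('/', b), (':', c)]) =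
    PySem.Dict.mk [('.', a + l.count '.'), ('/', b + l.count '/'), (':', c + l.count ':')] := by
  induction l generalizing a b c with
  | nil => simp
  | cons x t ih =>
    rw [List.foldl_cons]
    by_cases h1 : x = '.'
    · subst h1
      have : (PySem.Dict.mk [('.', a), ('/', b), (':', c)]).contains '.' = true := by simp
      rw [if_pos this]
      have hm : (PySem.Dict.mk [('.', a), ('/', b), (':', c)]).modify '.' 0 (· + 1)
          = PySem.Dict.mk [('.', a + 1), ('/', b), (':', c)] := by
        simp [PySem.Dict.modify, PySem.Dict.insert, PySem.Dict.getD, PySem.Dict.get?_mk_cons]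
      rw [hm, ih]
      simp
      ring
    · by_cases h2 : x = '/'
      · subst h2
        have : (PySem.Dict.mk [('.', a), ('/', b), (':', c)]).contains '/' = true := by simp
        rw [if_pos this]
        have hm : (PySem.Dict.mk [('.', a), ('/', b), (':', c)]).modify '/' 0 (· + 1)
            = PySem.Dict.mk [('.', a), ('/', b + 1), (':', c)] := by
          simp [PySem.Dict.modify, PySem.Dict.insert, PySem.Dict.getD, PySem.Dict.get?_mk_cons]
        rw [hm, ih]
        simp
        ring
      · by_cases h3 : x = ':'
        · subst h3
          have : (PySem.Dict.mk [('.', a), ('/', b), (':', c)]).contains ':' = true := by simp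
          rw [if_pos this]
          have hm : (PySem.Dict.mk [('.', a), ('/', b), (':', c)]).modify ':' 0 (· + 1)
              = PySem.Dict.mk [('.', a), ('/', b), (':', c + 1)] := by
            simp [PySem.Dict.modify, PySem.Dict.insert, PySem.Dict.getD, PySem.Dict.get?_mk_cons]
          rw [hm, ih]
          simp
          ring
        · have : (PySem.Dict.mk [('.', a), ('/', b), (':', c)]).contains x = false := by
            simp
            exact ⟨fun h => h1 h.symm, fun h => h2 h.symm, fun h => h3 h.symm⟩
          rw [if_neg (by simp [this]), ih]
          simp [h1, h2, h3]

-- B's early-exit scan decides exactly that each delimiter occurs at most once (counting seen ones)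
lemma scanB_counts (l : List Char) (seen : PySem.Set Char) :
    scanB l seen =
      (decide (l.count '.' + (if PySem.Set.contains seen '.' then 1 else 0) ≤ 1) &&
       decide (l.count '/' + (if PySem.Set.contains seen '/' then 1 else 0) ≤ 1) &&
       decide (l.count ':' + (if PySem.Set.contains seen ':' then 1 else 0) ≤ 1)) := by
  induction l generalizing seen with
  | nil => simp [scanB]; split_ifs <;> simp
  | cons x t ih =>
    by_cases h1 : x = '.'
    · subst h1
      by_cases hs : '.' ∈ seen
      · simp [scanB, hs, List.count_cons]
      · simp [scanB, hs, ih, PySem.Set.mem_add]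
    · by_cases h2 : x = '/'
      · subst h2
        by_cases hs : '/' ∈ seen
        · simp [scanB, hs, List.count_cons]
        · simp [scanB, hs, ih, PySem.Set.mem_add]
      · by_cases h3 : x = ':'
        · subst h3
          by_cases hs : ':' ∈ seen
          · simp [scanB, hs, List.count_cons]
          · simp [scanB, hs, ih, PySem.Set.mem_add]
        · have hd : ¬ (x = '.' ∨ x = '/' ∨ x = ':') := by tauto
          simp [scanB, hd, ih, List.count_cons, h1, h2, h3]

-- ===== VERDICT (by name: the statement is the Claim_ definition above) =====
theorem check_if_syl_spec : Claim_equal_check_if_syl := by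
  intro s _
  unfold Spec_check_if_syl check_if_syl check_if_syl_alt
  dsimp only
  rw [foldA_counts, scanB_counts]
  simp [checkItemsA, PySem.Set.empty]
  simp [← decide_not, Bool.and_assoc]
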